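-- pv_equiv track=rewrite | github.com/sarahgarson/di_exercises | week26/Day2/Daily-Challenge/daily-challenge.py | decrypt_matrix
-- ===== SOURCE A (Python) =====
-- def decrypt_matrix(matrix):
--   message = ""
--   for i in range(len(matrix[0])):
--     for j in range(len(matrix)):
--       if matrix[j][i].isalpha():
--         message += matrix[j][i]
--       elif message and message[-1] != " ":
--         message += " "
--   return message.strip()
-- ===== SOURCE B (Python) =====
-- def decrypt_matrix(matrix):
--   cells = [matrix[j][i] for i in range(len(matrix[0])) for j in range(len(matrix))]
--   s = "".join(c if c.isalpha() else " " for c in cells)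
--   return " ".join(s.split())
-- ===== Notes on version B (the rewrite author's own statement) =====
-- stated objective: simpler
-- what changed: Replaces the stateful single-pass collapse (conditional space appends guarded by the last character of the accumulator) with a stateless flatten-map-reshape pipeline: list the cells in column-major order, map each to itself or a space, and collapse/trim with ' '.join(s.split()).
import Mathlib
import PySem

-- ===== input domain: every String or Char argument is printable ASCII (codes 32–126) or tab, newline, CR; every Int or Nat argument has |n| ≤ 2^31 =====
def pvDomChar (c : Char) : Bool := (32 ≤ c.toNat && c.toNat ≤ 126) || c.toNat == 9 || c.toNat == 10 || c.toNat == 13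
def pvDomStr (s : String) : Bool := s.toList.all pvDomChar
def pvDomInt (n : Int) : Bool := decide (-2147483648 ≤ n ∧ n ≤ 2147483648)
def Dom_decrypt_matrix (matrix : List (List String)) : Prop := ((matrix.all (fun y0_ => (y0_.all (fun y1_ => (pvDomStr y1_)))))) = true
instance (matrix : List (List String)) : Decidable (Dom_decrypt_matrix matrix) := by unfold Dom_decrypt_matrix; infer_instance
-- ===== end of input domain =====

-- B replaces A's stateful collapse (conditional space appends guarded by the accumulator's
-- last character) with a stateless flatten-map pipeline finished by split/join (objective: simpler).

-- ===== PORT A =====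
def decrypt_matrix (matrix : List (List String)) : String :=
  let message : String :=
    (List.range (matrix.headD []).length).foldl (fun message i =>
      (List.range matrix.length).foldl (fun message j =>
        let cell := (matrix.getD j []).getD i ""
        if PySem.Str.strIsalpha cell then message ++ cell
        else if message ≠ "" ∧ PySem.Str.pyGet? message (-1) ≠ some ' ' then message ++ " "
        else message) message) ""
  PySem.Str.strip message

-- ===== PORT B =====
def decrypt_matrix_alt (matrix : List (List String)) : String :=
  let cells : List String :=
    (List.range (matrix.headD []).length).flatMap (fun i =>
      (List.range matrix.length).map (fun j => (matrix.getD j []).getD i ""))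
  let s : String :=
    PySem.Str.join "" (cells.map (fun c => if PySem.Str.strIsalpha c then c else " "))
  PySem.Str.join " " (PySem.Str.split₀ s)

-- ===== PRECONDITION & SPEC =====
-- Pre_ excludes exactly the inputs where the Python A raises IndexError: the empty matrix
-- (matrix[0]) and ragged matrices with a row shorter than the first row (matrix[j][i]).
def Pre_decrypt_matrix (matrix : List (List String)) : Prop :=
  matrix ≠ [] ∧ ∀ row ∈ matrix, (matrix.headD []).length ≤ row.length
instance (matrix : List (List String)) : Decidable (Pre_decrypt_matrix matrix) := by
  unfold Pre_decrypt_matrix; infer_instance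

def pvWitness_decrypt_matrix : List (List String) := [["Hi", "x!"], ["a b", "Zz"]]

def Spec_decrypt_matrix (matrix : List (List String)) (out : String) : Prop := out = decrypt_matrix_alt matrix
instance (matrix : List (List String)) (out : String) : Decidable (Spec_decrypt_matrix matrix out) := by
  unfold Spec_decrypt_matrix; infer_instance

-- ===== CLAIM (what is proved, stated in full; the proofs are below) =====
def Claim_equal_decrypt_matrix : Prop := ∀ (matrix : List (List String)), Dom_decrypt_matrix matrix → Pre_decrypt_matrix matrix → Spec_decrypt_matrix matrix (decrypt_matrix matrix)

-- ===== LEMMAS AND PROOFS =====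

-- chars contributed by a cell token: an alpha cell keeps its characters, anything else is one space
def tokChars : Option (List Char) → List Char
  | some w => w
  | none => [' ']

-- cell classifier shared by both reductions
def tokF (c : String) : Option (List Char) :=
  if PySem.Str.strIsalpha c then some c.toList else none

-- A's loop body for one cell, at the String level
def cellStep (message : String) (cell : String) : String :=
  if PySem.Str.strIsalpha cell then message ++ cell
  else if message ≠ "" ∧ PySem.Str.pyGet? message (-1) ≠ some ' ' then message ++ " "
  else message

-- A's loop body, per cell token, at the character level
def stepA (msg : List Char) (t : Option (List Char)) : List Char :=
  match t with
  | some w => msg ++ w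
  | none => if msg ≠ [] ∧ msg.getLast? ≠ some ' ' then msg ++ [' '] else msg

-- A's message as a function of the split₀-style state (current word and finished words, reversed)
def M : List Char → List (List Char) → List Char
  | [], [] => []
  | [], a :: acc => PySem.Chars.join [' '] ((a :: acc).reverse) ++ [' ']
  | c :: cur, acc => PySem.Chars.join [' '] (acc.reverse ++ [(c :: cur).reverse])

-- the word list split₀.go produces from the remaining tokens and the current state
def wordsGo : List (Option (List Char)) → List Char → List (List Char) → List (List Char)
  | [], cur, acc => if cur.isEmpty then acc.reverse else (cur.reverse :: acc).reverse
  | some w :: r, cur, acc => wordsGo r (w.reverse ++ cur) acc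
  | none :: r, cur, acc => wordsGo r [] (if cur.isEmpty then acc else cur.reverse :: acc)

def goodWord (w : List Char) : Prop := w ≠ [] ∧ ∀ c ∈ w, PySem.Chars.isalpha c
def goodTok (t : Option (List Char)) : Prop := ∀ w, t = some w → goodWord w

-- the column-major cell list both reductions share
def cellsOf (matrix : List (List String)) : List String :=
  (List.range (matrix.headD []).length).flatMap (fun i =>
    (List.range matrix.length).map (fun j => (matrix.getD j []).getD i ""))

theorem M_nil_nil : M [] [] = [] := rfl
theorem M_nil_cons (a : List Char) (acc : List (List Char)) :
    M [] (a :: acc) = PySem.Chars.join [' '] ((a :: acc).reverse) ++ [' '] := rfl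
theorem M_cons (c : Char) (cur : List Char) (acc : List (List Char)) :
    M (c :: cur) acc = PySem.Chars.join [' '] (acc.reverse ++ [(c :: cur).reverse]) := rfl

theorem alpha_not_space (c : Char) (h : PySem.Chars.isalpha c = true) :
    PySem.Chars.isspace c = false := by
  have h' : (65 ≤ c.toNat ∧ c.toNat ≤ 90) ∨ (97 ≤ c.toNat ∧ c.toNat ≤ 122) := by
    have e1 : (('A' : Char) ≤ c) ↔ 65 ≤ c.toNat := by
      rw [Char.le_def, UInt32.le_iff_toNat_le]; rfl
    have e2 : (c ≤ ('Z' : Char)) ↔ c.toNat ≤ 90 := by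
      rw [Char.le_def, UInt32.le_iff_toNat_le]; rfl
    have e3 : (('a' : Char) ≤ c) ↔ 97 ≤ c.toNat := by
      rw [Char.le_def, UInt32.le_iff_toNat_le]; rfl
    have e4 : (c ≤ ('z' : Char)) ↔ c.toNat ≤ 122 := by
      rw [Char.le_def, UInt32.le_iff_toNat_le]; rfl
    simp only [PySem.Chars.isalpha, PySem.Chars.isupper, PySem.Chars.islower,
      Bool.or_eq_true, Bool.and_eq_true, decide_eq_true_eq] at h
    rcases h with ⟨h1, h2⟩ | ⟨h1, h2⟩
    · exact Or.inl ⟨e1.mp h1, e2.mp h2⟩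
    · exact Or.inr ⟨e3.mp h1, e4.mp h2⟩
  rw [PySem.Chars.isspace]
  simp only [Bool.or_eq_false_iff, Bool.and_eq_false_iff, decide_eq_false_iff_not]
  omega

theorem alpha_ne_space (c : Char) (h : PySem.Chars.isalpha c = true) : c ≠ ' ' := by
  intro hc; subst hc; exact absurd h (by decide)

theorem join_concat (xs : List (List Char)) (y : List Char) :
    PySem.Chars.join [' '] (xs ++ [y]) =
      (if xs = [] then [] else PySem.Chars.join [' '] xs ++ [' ']) ++ y := by
  induction xs with
  | nil => simp [PySem.Chars.join_singleton]
  | cons x xs ih =>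
    cases xs with
    | nil => simp [PySem.Chars.join_cons_cons, PySem.Chars.join_singleton]
    | cons x' xs' =>
      rw [show x :: x' :: xs' ++ [y] = x :: x' :: (xs' ++ [y]) from rfl,
        PySem.Chars.join_cons_cons]
      rw [show x' :: (xs' ++ [y]) = (x' :: xs') ++ [y] from rfl, ih]
      simp [PySem.Chars.join_cons_cons]

theorem lstrip_cons_alpha (c : Char) (cs : List Char) (h : PySem.Chars.isalpha c = true) :
    PySem.Chars.lstrip (c :: cs) = c :: cs := by
  simp [PySem.Chars.lstrip, alpha_not_space c h]

theorem rstrip_append_space (xs : List Char) :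
    PySem.Chars.rstrip (xs ++ [' ']) = PySem.Chars.rstrip xs := by
  have h : PySem.Chars.isspace ' ' = true := by decide
  simp [PySem.Chars.rstrip, h]

theorem rstrip_last_alpha (xs : List Char) (c : Char) (hl : xs.getLast? = some c)
    (h : PySem.Chars.isalpha c = true) : PySem.Chars.rstrip xs = xs := by
  have hrev : xs.reverse.head? = some c := by simpa using hl
  cases hx : xs.reverse with
  | nil => simp [hx] at hrev
  | cons d t =>
    rw [hx] at hrev
    have hd : d = c := by simpa using hrev
    subst hd
    have h1 : PySem.Chars.rstrip xs = (List.dropWhile PySem.Chars.isspace (d :: t)).reverse := by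
      rw [PySem.Chars.rstrip, hx]
    rw [h1, List.dropWhile_cons, if_neg (by simp [alpha_not_space d h]), ← hx]
    simp

theorem join_head_alpha (w : List Char) (ws : List (List Char)) (hw : goodWord w) :
    ∃ c cs, PySem.Chars.join [' '] (w :: ws) = c :: cs ∧ PySem.Chars.isalpha c = true := by
  obtain ⟨hne, hall⟩ := hw
  obtain ⟨c, w', rfl⟩ := List.exists_cons_of_ne_nil hne
  have hc : PySem.Chars.isalpha c = true := hall c (by simp)
  cases ws with
  | nil => exact ⟨c, w', by simp [PySem.Chars.join_singleton], hc⟩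
  | cons q rest =>
    exact ⟨c, w' ++ [' '] ++ PySem.Chars.join [' '] (q :: rest),
      by simp [PySem.Chars.join_cons_cons], hc⟩

theorem rstrip_join (ws : List (List Char)) (h : ∀ w ∈ ws, goodWord w) (hne : ws ≠ []) :
    PySem.Chars.rstrip (PySem.Chars.join [' '] ws) = PySem.Chars.join [' '] ws := by
  rcases List.eq_nil_or_concat ws with rfl | ⟨xs, w, rfl⟩
  · exact absurd rfl hne
  · simp only [List.concat_eq_append] at h ⊢
    obtain ⟨hwne, hall⟩ := h w (by simp)
    obtain ⟨c, hc⟩ : ∃ c, w.getLast? = some c := by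
      cases hw' : w.getLast? with
      | none => exact absurd (List.getLast?_eq_none_iff.mp hw') hwne
      | some c => exact ⟨c, rfl⟩
    have hmem : c ∈ w := List.mem_of_getLast? hc
    have hlast : (PySem.Chars.join [' '] (xs ++ [w])).getLast? = some c := by
      rw [join_concat, List.getLast?_append, hc]; rfl
    exact rstrip_last_alpha _ c hlast (hall c hmem)

theorem strip_join (ws : List (List Char)) (h : ∀ w ∈ ws, goodWord w) :
    PySem.Chars.strip (PySem.Chars.join [' '] ws) = PySem.Chars.join [' '] ws ∧
    PySem.Chars.strip (PySem.Chars.join [' '] ws ++ [' ']) = PySem.Chars.join [' '] ws := by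
  cases ws with
  | nil => constructor <;> decide
  | cons w ws' =>
    obtain ⟨c, cs, hj, hc⟩ := join_head_alpha w ws' (h w (by simp))
    constructor
    · rw [PySem.Chars.strip, hj, lstrip_cons_alpha c cs hc, ← hj]
      exact rstrip_join _ h (by simp)
    · rw [PySem.Chars.strip]
      have h2 : PySem.Chars.join [' '] (w :: ws') ++ [' '] = c :: (cs ++ [' ']) := by
        rw [hj]; simp
      rw [h2, lstrip_cons_alpha c (cs ++ [' ']) hc, ← List.cons_append, ← hj,
        rstrip_append_space]
      exact rstrip_join _ h (by simp)

theorem M_some (w cur : List Char) (acc : List (List Char)) (hw : goodWord w) :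
    stepA (M cur acc) (some w) = M (w.reverse ++ cur) acc := by
  obtain ⟨hwne, _⟩ := hw
  have hrne : w.reverse ≠ [] := by simpa using hwne
  obtain ⟨d, t, hdt⟩ := List.exists_cons_of_ne_nil hrne
  have hback : (d :: t).reverse = w := by rw [← hdt]; simp
  simp only [stepA]
  cases cur with
  | nil =>
    rw [List.append_nil, hdt, M_cons, hback]
    cases acc with
    | nil => simp [M_nil_nil, PySem.Chars.join_singleton]
    | cons a acc' =>
      rw [M_nil_cons, join_concat, if_neg (by simp)]
  | cons e cur' =>
    rw [M_cons, show w.reverse ++ e :: cur' = d :: (t ++ e :: cur') by rw [hdt]; rfl,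
      M_cons, show (d :: (t ++ e :: cur')).reverse = (e :: cur').reverse ++ w by
        rw [show d :: (t ++ e :: cur') = (d :: t) ++ (e :: cur') from rfl,
          List.reverse_append, hback]]
    rw [join_concat, join_concat]
    simp

theorem M_none (cur : List Char) (acc : List (List Char))
    (hcur : ∀ c ∈ cur, PySem.Chars.isalpha c = true) :
    stepA (M cur acc) none = M [] (if cur.isEmpty then acc else cur.reverse :: acc) := by
  cases cur with
  | nil =>
    simp only [List.isEmpty_nil, if_pos]
    cases acc with
    | nil => simp [stepA, M_nil_nil]
    | cons a acc' =>
      rw [M_nil_cons]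
      simp only [stepA]
      rw [if_neg]
      intro ⟨_, h2⟩
      exact h2 (by rw [List.getLast?_append]; rfl)
  | cons e cur' =>
    have he : PySem.Chars.isalpha e = true := hcur e (by simp)
    have hlast : (M (e :: cur') acc).getLast? = some e := by
      rw [M_cons, join_concat, List.getLast?_append]
      simp [List.getLast?_reverse]
    have hne : M (e :: cur') acc ≠ [] := by
      intro h0; rw [h0] at hlast; simp at hlast
    have hns : (M (e :: cur') acc).getLast? ≠ some ' ' := by
      rw [hlast]; intro h0
      exact alpha_ne_space e he (by injection h0)
    simp only [stepA]
    rw [if_pos ⟨hne, hns⟩]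
    simp only [List.isEmpty_cons, if_neg Bool.false_ne_true]
    rw [M_cons, M_nil_cons]
    simp

theorem foldA_eq (toks : List (Option (List Char))) (cur : List Char) (acc : List (List Char))
    (ht : ∀ t ∈ toks, goodTok t) (hcur : ∀ c ∈ cur, PySem.Chars.isalpha c = true)
    (hacc : ∀ w ∈ acc, goodWord w) :
    PySem.Chars.strip (List.foldl stepA (M cur acc) toks) =
      PySem.Chars.join [' '] (wordsGo toks cur acc) := by
  induction toks generalizing cur acc with
  | nil =>
    rw [List.foldl_nil]
    cases cur with
    | nil =>
      simp only [wordsGo, List.isEmpty_nil, if_pos]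
      cases acc with
      | nil => simp [M_nil_nil, PySem.Chars.join_nil]; decide
      | cons a acc' =>
        rw [M_nil_cons]
        exact (strip_join _ (fun v hv => hacc v (List.mem_reverse.mp hv))).2
    | cons e cur' =>
      simp only [wordsGo, List.isEmpty_cons, if_neg Bool.false_ne_true]
      rw [show ((e :: cur').reverse :: acc).reverse = acc.reverse ++ [(e :: cur').reverse] from
        List.reverse_cons, M_cons]
      refine (strip_join _ ?_).1
      intro v hv
      rcases List.mem_append.mp hv with h1 | h1
      · exact hacc v (List.mem_reverse.mp h1)
      · rw [List.mem_singleton.mp h1]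
        refine ⟨by simp, fun x hx => hcur x (List.mem_reverse.mp hx)⟩
  | cons t r ih =>
    cases t with
    | some w =>
      have hw : goodWord w := (ht (some w) (by simp)) w rfl
      rw [List.foldl_cons, M_some w cur acc hw, wordsGo]
      refine ih _ _ (fun x hx => ht x (by simp [hx])) ?_ hacc
      intro c hc
      rcases List.mem_append.mp hc with h1 | h1
      · exact hw.2 c (by simpa using h1)
      · exact hcur c h1
    | none =>
      rw [List.foldl_cons, M_none cur acc hcur, wordsGo]
      refine ih _ _ (fun x hx => ht x (by simp [hx])) (by intro c hc; simp at hc) ?_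
      by_cases hce : cur.isEmpty
      · rw [if_pos hce]; exact hacc
      · rw [if_neg hce]
        intro v hv
        rcases List.mem_cons.mp hv with h1 | h1
        · subst h1
          refine ⟨by simpa using (List.isEmpty_eq_false_iff.mp (by simpa using hce)), ?_⟩
          intro x hx
          exact hcur x (by simpa using hx)
        · exact hacc v h1

theorem go_alpha_chunk (w cs cur : List Char) (acc : List (List Char))
    (hw : ∀ c ∈ w, PySem.Chars.isalpha c = true) :
    PySem.Chars.split₀.go (w ++ cs) cur acc =
      PySem.Chars.split₀.go cs (w.reverse ++ cur) acc := by
  induction w generalizing cur with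
  | nil => simp
  | cons c w' ih =>
    have hc := alpha_not_space c (hw c (by simp))
    rw [List.cons_append, PySem.Chars.split₀.go, if_neg (by simp [hc])]
    rw [ih _ (fun x hx => hw x (by simp [hx]))]
    simp

theorem split_go_eq (toks : List (Option (List Char))) (cur : List Char)
    (acc : List (List Char)) (ht : ∀ t ∈ toks, goodTok t) :
    PySem.Chars.split₀.go ((toks.map tokChars).flatten) cur acc = wordsGo toks cur acc := by
  induction toks generalizing cur acc with
  | nil => rw [List.map_nil, List.flatten_nil, PySem.Chars.split₀.go, wordsGo]
  | cons t r ih =>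
    cases t with
    | some w =>
      simp only [List.map_cons, List.flatten_cons, tokChars]
      rw [go_alpha_chunk w _ cur acc ((ht (some w) (by simp)) w rfl).2, wordsGo]
      exact ih _ _ (fun x hx => ht x (by simp [hx]))
    | none =>
      simp only [List.map_cons, List.flatten_cons, tokChars, List.singleton_append]
      rw [PySem.Chars.split₀.go, if_pos (by decide), wordsGo]
      by_cases hce : cur.isEmpty = true
      · rw [if_pos hce, if_pos hce]
        exact ih _ _ (fun x hx => ht x (by simp [hx]))
      · rw [if_neg hce, if_neg hce]
        exact ih _ _ (fun x hx => ht x (by simp [hx]))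

theorem pyGet_neg_one (s : String) : PySem.Str.pyGet? s (-1) = s.toList.getLast? := by
  rw [PySem.Str.pyGet?]
  cases h : s.toList with
  | nil => simp [PySem.Chars.pyGet?_eq_listPyGet?, PySem.List.pyGet?, PySem.List.pyIdx?]
  | cons c t =>
    simp [PySem.Chars.pyGet?_eq_listPyGet?, PySem.List.pyGet?, PySem.List.pyIdx?,
      List.getLast?_eq_getElem?]

theorem str_ne_empty_iff (s : String) : (s ≠ "") ↔ s.toList ≠ [] := by
  simp [String.toList_eq_nil_iff]

theorem foldG_toList (cells : List String) : ∀ msg : String,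
    (List.foldl cellStep msg cells).toList = List.foldl stepA msg.toList (cells.map tokF) := by
  induction cells with
  | nil => intro msg; rfl
  | cons c cs ih =>
    intro msg
    rw [List.foldl_cons, List.map_cons, List.foldl_cons, ih]
    congr 1
    by_cases h : PySem.Str.strIsalpha c
    · have h' : PySem.Chars.strIsalpha c.toList = true := h
      simp [cellStep, tokF, h', stepA, String.toList_append, PySem.Str.strIsalpha]
    · simp only [cellStep, tokF, if_neg h, stepA]
      have hiff : (msg ≠ "" ∧ PySem.Str.pyGet? msg (-1) ≠ some ' ') ↔
          (msg.toList ≠ [] ∧ msg.toList.getLast? ≠ some ' ') := by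
        rw [str_ne_empty_iff, pyGet_neg_one]
      by_cases h2 : msg.toList ≠ [] ∧ msg.toList.getLast? ≠ some ' '
      · rw [if_pos (hiff.mpr h2), if_pos h2, String.toList_append]; rfl
      · rw [if_neg (fun hx => h2 (hiff.mp hx)), if_neg h2]

theorem join_nil_sep (xss : List (List Char)) : PySem.Chars.join [] xss = xss.flatten := by
  induction xss with
  | nil => rfl
  | cons x xss' ih =>
    cases xss' with
    | nil => simp [PySem.Chars.join_singleton]
    | cons y rest => rw [PySem.Chars.join_cons_cons, List.flatten_cons, ← ih]; simp

theorem good_toks (cells : List String) : ∀ t ∈ cells.map tokF, goodTok t := by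
  intro t ht w hw
  obtain ⟨c, _, rfl⟩ := List.mem_map.mp ht
  rw [tokF] at hw
  by_cases h : PySem.Str.strIsalpha c
  · rw [if_pos h] at hw
    have h' : PySem.Chars.strIsalpha c.toList = true := h
    rw [PySem.Chars.strIsalpha, Bool.and_eq_true, Bool.not_eq_true', List.isEmpty_eq_false_iff,
      List.all_eq_true] at h'
    have hww : w = c.toList := (Option.some.inj hw).symm
    subst hww
    exact ⟨h'.1, h'.2⟩
  · rw [if_neg h] at hw
    simp at hw

theorem tok_map_eq (cells : List String) :
    (cells.map (fun c => if PySem.Str.strIsalpha c then c else " ")).map String.toList =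
      (cells.map tokF).map tokChars := by
  rw [List.map_map, List.map_map]
  refine List.map_congr_left ?_
  intro c _
  by_cases h : PySem.Str.strIsalpha c
  · have h' : PySem.Chars.strIsalpha c.toList = true := h
    simp [tokF, tokChars, h', PySem.Str.strIsalpha]
  · have h' : ¬ PySem.Chars.strIsalpha c.toList = true := h
    simp [tokF, tokChars, h', PySem.Str.strIsalpha]

theorem ports_eq (matrix : List (List String)) :
    decrypt_matrix matrix = decrypt_matrix_alt matrix := by
  simp only [decrypt_matrix, decrypt_matrix_alt]
  have hA : (List.range (matrix.headD []).length).foldl (fun message i =>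
      (List.range matrix.length).foldl (fun message j =>
        let cell := (matrix.getD j []).getD i ""
        if PySem.Str.strIsalpha cell then message ++ cell
        else if message ≠ "" ∧ PySem.Str.pyGet? message (-1) ≠ some ' ' then message ++ " "
        else message) message) "" = List.foldl cellStep "" (cellsOf matrix) := by
    rw [cellsOf, List.foldl_flatMap]
    congr 1
    funext acc x
    rw [List.foldl_map]
    rfl
  rw [hA]
  rw [show (List.range (matrix.headD []).length).flatMap (fun i =>
      (List.range matrix.length).map (fun j => (matrix.getD j []).getD i "")) =
      cellsOf matrix from rfl]
  set cells := cellsOf matrix with hc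
  rw [PySem.Str.strip, PySem.Str.join, PySem.Str.split₀, PySem.Str.join]
  refine congrArg String.ofList ?_
  rw [foldG_toList cells ""]
  rw [List.map_map]
  simp only [Function.comp_def, String.toList_ofList, List.map_id']
  rw [show String.toList "" = ([] : List Char) by decide,
    show String.toList " " = ([' '] : List Char) by decide]
  rw [tok_map_eq, join_nil_sep]
  rw [show PySem.Chars.split₀ (((cells.map tokF).map tokChars).flatten) =
    PySem.Chars.split₀.go (((cells.map tokF).map tokChars).flatten) [] [] from rfl]
  rw [split_go_eq _ [] [] (good_toks cells)]
  exact foldA_eq _ [] [] (good_toks cells) (by intro c hc0; simp at hc0)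
    (by intro w hw; simp at hw)

-- ===== VERDICT (by name: the statement is the Claim_ definition above) =====
theorem decrypt_matrix_spec : Claim_equal_decrypt_matrix := by
  intro matrix _ _
  unfold Spec_decrypt_matrix
  exact ports_eq matrix
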